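-- pv_equiv track=rewrite | github.com/t170815518/Utilities | baseConverter.py | decimal_to
-- ===== SOURCE A (Python) =====
-- def decimal_to(integerPart, radix):
--     # integerPart is string, radix is integer
--     decimal = int(integerPart)
--     converted = ''
--     quotient = decimal//radix
--     while quotient != 0:
--         remainder = decimal % radix
--         if (radix == 16) and (remainder >= 10):
--             converted = chr(remainder + 55) + converted
--         else:
--             converted = str(remainder)+converted
--         decimal = quotient
--         quotient = decimal//radix
--     if (radix == 16) and (decimal >= 10):
--         converted = chr(decimal + 55) + converted
--     else:
--         converted = str(decimal) + converted
--     return converted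
-- ===== SOURCE B (Python) =====
-- def decimal_to(integerPart, radix):
--     # recursive digit-by-digit conversion instead of A's prepend-accumulator while loop
--     def digit(d):
--         return chr(d + 55) if radix == 16 and d >= 10 else str(d)
--
--     def conv(n):
--         q = n // radix
--         if q == 0:
--             return digit(n)
--         return conv(q) + digit(n % radix)
--
--     return conv(int(integerPart))
-- ===== Notes on version B (the rewrite author's own statement) =====
-- stated objective: alternative
-- what changed: Replaces A's while loop that prepends digits to a string accumulator with a direct recursion conv(n) = conv(n // radix) + digit(n % radix) that builds the result back-to-front without an accumulator.
import Mathlib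
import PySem

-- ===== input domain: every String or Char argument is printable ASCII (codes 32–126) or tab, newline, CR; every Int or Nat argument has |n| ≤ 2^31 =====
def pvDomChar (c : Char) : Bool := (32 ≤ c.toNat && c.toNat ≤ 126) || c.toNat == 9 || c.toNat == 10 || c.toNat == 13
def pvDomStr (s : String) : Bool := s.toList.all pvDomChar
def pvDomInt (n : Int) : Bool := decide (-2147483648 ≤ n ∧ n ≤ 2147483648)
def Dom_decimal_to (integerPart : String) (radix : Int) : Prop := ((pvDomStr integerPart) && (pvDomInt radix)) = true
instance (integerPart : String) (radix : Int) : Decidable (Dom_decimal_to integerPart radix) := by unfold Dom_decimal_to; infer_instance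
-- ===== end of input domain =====

-- B replaces A's accumulator while-loop with a direct recursion conv(n) = conv(n//radix) ++ digit(n%radix); same cost (objective: alternative).


-- ===== PORT A =====
-- A's while loop; fuel is totality scaffolding only (never exhausted on Pre_; the
-- fuel-0 result mirrors the post-loop prepend so it is a plain default, not an algorithm switch).
def decimalToLoopA (radix : Int) : Nat → Int → String → String
  | Nat.succ fuel, decimal, converted =>
      let quotient := PySem.Int.floordiv decimal radix
      if quotient ≠ 0 then
        let remainder := PySem.Int.mod decimal radix
        let converted :=
          (if radix = 16 ∧ remainder ≥ 10 then String.ofList [Char.ofNat (remainder + 55).toNat]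
           else PySem.Int.toStr remainder) ++ converted
        decimalToLoopA radix fuel quotient converted
      else
        (if radix = 16 ∧ decimal ≥ 10 then String.ofList [Char.ofNat (decimal + 55).toNat]
         else PySem.Int.toStr decimal) ++ converted
  | 0, decimal, converted =>
      (if radix = 16 ∧ decimal ≥ 10 then String.ofList [Char.ofNat (decimal + 55).toNat]
       else PySem.Int.toStr decimal) ++ converted

def decimal_to (integerPart : String) (radix : Int) : String :=
  match PySem.Int.ofStr? integerPart with
  | none => ""   -- Python raises ValueError here; excluded by Pre_
  | some decimal => decimalToLoopA radix (decimal.natAbs + 2) decimal ""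

-- ===== PORT B =====
def digitB (radix d : Int) : String :=
  if radix = 16 ∧ d ≥ 10 then String.ofList [Char.ofNat (d + 55).toNat] else PySem.Int.toStr d

-- Source B's conv; fuel is totality scaffolding only (never exhausted on Pre_).
def convB (radix : Int) : Nat → Int → String
  | Nat.succ fuel, n =>
      let q := PySem.Int.floordiv n radix
      if q = 0 then digitB radix n
      else convB radix fuel q ++ digitB radix (PySem.Int.mod n radix)
  | 0, n => digitB radix n

def decimal_to_alt (integerPart : String) (radix : Int) : String :=
  match PySem.Int.ofStr? integerPart with
  | none => ""   -- Python raises ValueError here; excluded by Pre_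
  | some decimal => convB radix (decimal.natAbs + 2) decimal

-- ===== PRECONDITION & SPEC =====
-- Pre_ excludes exactly where Python A does not return: unparseable strings (ValueError),
-- radix = 0 (ZeroDivisionError), and the divergent combinations (negative value with
-- radix ≥ 2; radix = ±1 with nonzero value).
def Pre_decimal_to (integerPart : String) (radix : Int) : Prop :=
  (PySem.Int.ofStr? integerPart).any
    (fun d => decide ((2 ≤ radix ∧ 0 ≤ d) ∨ radix ≤ -2 ∨ (d = 0 ∧ (radix = 1 ∨ radix = -1)))) = true
instance (integerPart : String) (radix : Int) : Decidable (Pre_decimal_to integerPart radix) := by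
  unfold Pre_decimal_to; infer_instance

def pvWitness_decimal_to : String × Int := ("255", 16)

def Spec_decimal_to (integerPart : String) (radix : Int) (out : String) : Prop := out = decimal_to_alt integerPart radix
instance (integerPart : String) (radix : Int) (out : String) : Decidable (Spec_decimal_to integerPart radix out) := by unfold Spec_decimal_to; infer_instance

-- ===== CLAIM (what is proved, stated in full; the proofs are below) =====
def Claim_equal_decimal_to : Prop := ∀ (integerPart : String) (radix : Int), Dom_decimal_to integerPart radix → Pre_decimal_to integerPart radix → Spec_decimal_to integerPart radix (decimal_to integerPart radix)

-- ===== LEMMAS AND PROOFS =====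
theorem loopA_eq_convB (radix : Int) (fuel : Nat) :
    ∀ (n : Int) (acc : String),
      decimalToLoopA radix fuel n acc = convB radix fuel n ++ acc := by
  induction fuel with
  | zero => intro n acc; simp [decimalToLoopA, convB, digitB]
  | succ fuel ih =>
      intro n acc
      by_cases h : PySem.Int.floordiv n radix = 0
      · simp [decimalToLoopA, convB, digitB, h]
      · simp only [decimalToLoopA, convB, digitB, h, if_neg,
          ne_eq, not_false_eq_true, if_true]
        rw [ih]
        simp [String.append_assoc]

-- ===== VERDICT (by name: the statement is the Claim_ definition above) =====
theorem decimal_to_spec : Claim_equal_decimal_to := by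
  intro integerPart radix _ _
  unfold Spec_decimal_to
  cases h : PySem.Int.ofStr? integerPart <;>
    simp [decimal_to, decimal_to_alt, h, loopA_eq_convB]
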